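-- pv_equiv track=rewrite | github.com/falcaozane/questonnaire | app.py | calculate_style_scores
-- ===== SOURCE A (Python) =====
-- style_mapping = {
--     'Authoritarian': [1, 2, 3],
--     'Participative': [4, 5, 6],
--     'Delegative': [7, 8, 9],
--     'Pacesetting': [10, 11, 12],
--     'Transactional': [13, 14, 15],
--     'Transformational': [16, 17, 18],
--     'Visionary': [19, 20, 21],
--     'Coaching': [22, 23, 24],
--     'Bureaucratic': [25, 26, 27]
-- }
--
-- def calculate_style_scores(responses):
--     style_scores = {style: 0 for style in style_mapping.keys()}
--
--     for i, response in enumerate(responses, 1):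
--         for style, questions in style_mapping.items():
--             if i in questions:
--                 style_scores[style] += response
--
--     best_style = max(style_scores, key=style_scores.get)
--     return best_style, style_scores
-- ===== SOURCE B (Python) =====
-- style_mapping = {
--     'Authoritarian': [1, 2, 3],
--     'Participative': [4, 5, 6],
--     'Delegative': [7, 8, 9],
--     'Pacesetting': [10, 11, 12],
--     'Transactional': [13, 14, 15],
--     'Transformational': [16, 17, 18],
--     'Visionary': [19, 20, 21],
--     'Coaching': [22, 23, 24],
--     'Bureaucratic': [25, 26, 27]
-- }
--
-- def calculate_style_scores(responses):
--     styles = list(style_mapping)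
--     style_scores = {s: sum(responses[3 * k:3 * k + 3]) for k, s in enumerate(styles)}
--     best_style = max(style_scores, key=style_scores.get)
--     return best_style, style_scores
-- ===== Notes on version B (the rewrite author's own statement) =====
-- stated objective: faster
-- what changed: Instead of scanning all 27 question numbers of every style for each response, B sums each style's fixed block directly with one slice responses[3k:3k+3] per style, so only the first 27 responses are ever touched.
import Mathlib
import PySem

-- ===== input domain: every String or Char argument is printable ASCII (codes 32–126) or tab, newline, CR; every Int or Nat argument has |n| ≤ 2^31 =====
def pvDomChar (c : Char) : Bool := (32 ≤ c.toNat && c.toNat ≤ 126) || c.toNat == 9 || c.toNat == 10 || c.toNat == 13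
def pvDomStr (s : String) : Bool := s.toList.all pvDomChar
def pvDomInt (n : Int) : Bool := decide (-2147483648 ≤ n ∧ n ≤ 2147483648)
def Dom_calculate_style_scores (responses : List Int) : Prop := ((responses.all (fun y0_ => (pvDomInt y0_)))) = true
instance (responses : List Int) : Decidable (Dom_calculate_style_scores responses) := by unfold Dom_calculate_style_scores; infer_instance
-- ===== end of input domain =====

-- B replaces A's nested scan (each response checked against all 27 question numbers)
-- by direct slice sums per style block; same return value (objective: faster on long inputs).

-- ===== PORT A =====
-- the module constant style_mapping, as its ordered items list
def styleMappingItems : List (String × List Int) :=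
  [("Authoritarian", [1, 2, 3]), ("Participative", [4, 5, 6]), ("Delegative", [7, 8, 9]),
   ("Pacesetting", [10, 11, 12]), ("Transactional", [13, 14, 15]),
   ("Transformational", [16, 17, 18]), ("Visionary", [19, 20, 21]),
   ("Coaching", [22, 23, 24]), ("Bureaucratic", [25, 26, 27])]

def calculate_style_scores (responses : List Int) : String × (List (String × Int)) :=
  -- style_scores = {style: 0 for style in style_mapping.keys()}
  let init : PySem.Dict String Int :=
    (styleMappingItems.map (·.1)).foldl (fun d s => d.insert s 0) PySem.Dict.empty
  -- for i, response in enumerate(responses, 1): for style, questions in style_mapping.items(): ...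
  -- style_scores[style] += response is Dict.modify with default 0 (the key is always present, so exact)
  let d : PySem.Dict String Int :=
    (PySem.List.enumerate responses 1).foldl
      (fun d p =>
        styleMappingItems.foldl
          (fun d sq => if p.1 ∈ sq.2 then d.modify sq.1 0 (· + p.2) else d) d)
      init
  -- best_style = max(style_scores, key=style_scores.get); the dict has 9 keys, so max? is some (getD "" unreachable)
  let best := (PySem.List.max? d.keys (fun k => d.getD k 0)).getD ""
  (best, d.items)

-- ===== PORT B =====
def calculate_style_scores_alt (responses : List Int) : String × (List (String × Int)) :=
  -- styles = list(style_mapping)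
  let styles : List String :=
    ["Authoritarian", "Participative", "Delegative", "Pacesetting", "Transactional",
     "Transformational", "Visionary", "Coaching", "Bureaucratic"]
  -- style_scores = {s: sum(responses[3*k:3*k+3]) for k, s in enumerate(styles)}
  let d : PySem.Dict String Int :=
    (PySem.List.enumerate styles 0).foldl
      (fun d p =>
        d.insert p.2 ((PySem.List.slice responses (some (3 * p.1)) (some (3 * p.1 + 3))).sum))
      PySem.Dict.empty
  -- best_style = max(style_scores, key=style_scores.get)
  let best := (PySem.List.max? d.keys (fun k => d.getD k 0)).getD ""
  (best, d.items)

-- ===== PRECONDITION & SPEC =====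
def Spec_calculate_style_scores (responses : List Int) (out : String × (List (String × Int))) : Prop := out = calculate_style_scores_alt responses
instance (responses : List Int) (out : String × (List (String × Int))) : Decidable (Spec_calculate_style_scores responses out) := by unfold Spec_calculate_style_scores; infer_instance

-- ===== CLAIM (what is proved, stated in full; the proofs are below) =====
def Claim_equal_calculate_style_scores : Prop := ∀ (responses : List Int), Dom_calculate_style_scores responses → Spec_calculate_style_scores responses (calculate_style_scores responses)

-- ===== LEMMAS AND PROOFS =====

-- windowed sum: pvW lo rs = sum of the elements of rs at (0-based) positions p with lo ≤ p ≤ lo + 2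
def pvW : Int → List Int → Int
  | _, [] => 0
  | lo, r :: rs => (if -2 ≤ lo ∧ lo ≤ 0 then r else 0) + pvW (lo - 1) rs

lemma pvW_eq (rs : List Int) : ∀ (lo : Int),
    pvW lo rs = ((rs.drop (max lo 0).toNat).take (min (lo + 3) 3).toNat).sum := by
  induction rs with
  | nil => intro lo; simp [pvW]
  | cons r rs ih =>
    intro lo
    show (if -2 ≤ lo ∧ lo ≤ 0 then r else 0) + pvW (lo - 1) rs = _
    rw [ih]
    by_cases h0 : lo ≤ 0
    · by_cases h3 : lo ≤ -3
      · rw [if_neg (by omega)]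
        have e1 : (min (lo - 1 + 3) 3).toNat = 0 := by omega
        have e2 : (min (lo + 3) 3).toNat = 0 := by omega
        simp [e1, e2]
      · rw [if_pos (by omega)]
        have e1 : (max lo 0).toNat = 0 := by omega
        have e2 : (max (lo - 1) 0).toNat = 0 := by omega
        have e3 : (min (lo + 3) 3).toNat = (min (lo - 1 + 3) 3).toNat + 1 := by omega
        simp [e1, e2, e3, List.take_succ_cons]
    · rw [if_neg (by omega)]
      have e1 : (max lo 0).toNat = (max (lo - 1) 0).toNat + 1 := by omega
      have e2 : (min (lo + 3) 3).toNat = 3 := by omega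
      have e3 : (min (lo - 1 + 3) 3).toNat = 3 := by omega
      simp [e1, e2, e3, List.drop_succ_cons]

lemma pvW_shift (a b i r v : Int) (rs : List Int) (hb : b = a + 2) :
    (v + if a ≤ i ∧ i ≤ b then r else 0) + pvW (a - (i + 1)) rs = v + pvW (a - i) (r :: rs) := by
  show _ = v + ((if -2 ≤ a - i ∧ a - i ≤ 0 then r else 0) + pvW (a - i - 1) rs)
  have e : a - (i + 1) = a - i - 1 := by ring
  rw [e]
  by_cases h : a ≤ i ∧ i ≤ b
  · rw [if_pos h, if_pos (by omega)]; ring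
  · rw [if_neg h, if_neg (by omega)]; ring

-- one iteration of A's inner loop over style_mapping.items()
lemma step_eval (i r v1 v2 v3 v4 v5 v6 v7 v8 v9 : Int) :
    styleMappingItems.foldl
      (fun d sq => if i ∈ sq.2 then d.modify sq.1 0 (· + r) else d)
      (PySem.Dict.mk [("Authoritarian", v1), ("Participative", v2), ("Delegative", v3),
        ("Pacesetting", v4), ("Transactional", v5), ("Transformational", v6),
        ("Visionary", v7), ("Coaching", v8), ("Bureaucratic", v9)]) =
    PySem.Dict.mk [("Authoritarian", v1 + if 1 ≤ i ∧ i ≤ 3 then r else 0),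
      ("Participative", v2 + if 4 ≤ i ∧ i ≤ 6 then r else 0),
      ("Delegative", v3 + if 7 ≤ i ∧ i ≤ 9 then r else 0),
      ("Pacesetting", v4 + if 10 ≤ i ∧ i ≤ 12 then r else 0),
      ("Transactional", v5 + if 13 ≤ i ∧ i ≤ 15 then r else 0),
      ("Transformational", v6 + if 16 ≤ i ∧ i ≤ 18 then r else 0),
      ("Visionary", v7 + if 19 ≤ i ∧ i ≤ 21 then r else 0),
      ("Coaching", v8 + if 22 ≤ i ∧ i ≤ 24 then r else 0),
      ("Bureaucratic", v9 + if 25 ≤ i ∧ i ≤ 27 then r else 0)] := by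
  by_cases h : 1 ≤ i ∧ i ≤ 27
  · obtain ⟨ha, hb⟩ := h
    interval_cases i <;>
      simp [styleMappingItems, PySem.Dict.modify, PySem.Dict.getD, PySem.Dict.get?, PySem.Dict.insert]
  · simp only [styleMappingItems, List.foldl_cons, List.foldl_nil, List.mem_cons,
      List.not_mem_nil, or_false]
    rw [if_neg (by omega), if_neg (by omega), if_neg (by omega), if_neg (by omega),
      if_neg (by omega), if_neg (by omega), if_neg (by omega), if_neg (by omega),
      if_neg (by omega), if_neg (by omega), if_neg (by omega), if_neg (by omega),
      if_neg (by omega), if_neg (by omega), if_neg (by omega), if_neg (by omega),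
      if_neg (by omega), if_neg (by omega)]
    simp

lemma altd_eval (f : Int → Int) :
    (PySem.List.enumerate
        ["Authoritarian", "Participative", "Delegative", "Pacesetting", "Transactional",
         "Transformational", "Visionary", "Coaching", "Bureaucratic"] 0).foldl
      (fun d p => d.insert p.2 (f p.1)) (PySem.Dict.empty : PySem.Dict String Int) =
    PySem.Dict.mk [("Authoritarian", f 0), ("Participative", f 1), ("Delegative", f 2),
      ("Pacesetting", f 3), ("Transactional", f 4), ("Transformational", f 5),
      ("Visionary", f 6), ("Coaching", f 7), ("Bureaucratic", f 8)] := by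
  rfl

lemma loop_inv (rs : List Int) : ∀ (i v1 v2 v3 v4 v5 v6 v7 v8 v9 : Int),
    (PySem.List.enumerate rs i).foldl
      (fun d p =>
        styleMappingItems.foldl
          (fun d sq => if p.1 ∈ sq.2 then d.modify sq.1 0 (· + p.2) else d) d)
      (PySem.Dict.mk [("Authoritarian", v1), ("Participative", v2), ("Delegative", v3),
        ("Pacesetting", v4), ("Transactional", v5), ("Transformational", v6),
        ("Visionary", v7), ("Coaching", v8), ("Bureaucratic", v9)]) =
    PySem.Dict.mk [("Authoritarian", v1 + pvW (1 - i) rs),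
      ("Participative", v2 + pvW (4 - i) rs), ("Delegative", v3 + pvW (7 - i) rs),
      ("Pacesetting", v4 + pvW (10 - i) rs), ("Transactional", v5 + pvW (13 - i) rs),
      ("Transformational", v6 + pvW (16 - i) rs), ("Visionary", v7 + pvW (19 - i) rs),
      ("Coaching", v8 + pvW (22 - i) rs), ("Bureaucratic", v9 + pvW (25 - i) rs)] := by
  induction rs with
  | nil => intro i v1 v2 v3 v4 v5 v6 v7 v8 v9; simp [PySem.List.enumerate_nil, pvW]
  | cons r rs ih =>
    intro i v1 v2 v3 v4 v5 v6 v7 v8 v9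
    rw [PySem.List.enumerate_cons, List.foldl_cons, step_eval, ih]
    have h1 := pvW_shift 1 3 i r v1 rs (by norm_num)
    have h4 := pvW_shift 4 6 i r v2 rs (by norm_num)
    have h7 := pvW_shift 7 9 i r v3 rs (by norm_num)
    have h10 := pvW_shift 10 12 i r v4 rs (by norm_num)
    have h13 := pvW_shift 13 15 i r v5 rs (by norm_num)
    have h16 := pvW_shift 16 18 i r v6 rs (by norm_num)
    have h19 := pvW_shift 19 21 i r v7 rs (by norm_num)
    have h22 := pvW_shift 22 24 i r v8 rs (by norm_num)
    have h25 := pvW_shift 25 27 i r v9 rs (by norm_num)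
    simp only [PySem.Dict.mk.injEq, List.cons.injEq, Prod.mk.injEq, and_true, true_and]
    exact ⟨h1, h4, h7, h10, h13, h16, h19, h22, h25⟩

-- ===== VERDICT (by name: the statement is the Claim_ definition above) =====
theorem calculate_style_scores_spec : Claim_equal_calculate_style_scores := by
  intro responses _
  unfold Spec_calculate_style_scores
  have hinit : (styleMappingItems.map (·.1)).foldl (fun d s => d.insert s 0) (PySem.Dict.empty : PySem.Dict String Int)
      = PySem.Dict.mk [("Authoritarian", 0), ("Participative", 0), ("Delegative", 0),
        ("Pacesetting", 0), ("Transactional", 0), ("Transformational", 0),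
        ("Visionary", 0), ("Coaching", 0), ("Bureaucratic", 0)] := by decide
  simp only [calculate_style_scores, calculate_style_scores_alt, hinit, loop_inv]
  simp only [pvW_eq]
  rw [altd_eval (fun k => (PySem.List.slice responses (some (3 * k)) (some (3 * k + 3))).sum)]
  norm_num [pysem]
  simp only [show Int.toNat 3 = 3 from rfl, show Int.toNat 6 = 6 from rfl,
    show Int.toNat 9 = 9 from rfl, show Int.toNat 12 = 12 from rfl,
    show Int.toNat 15 = 15 from rfl, show Int.toNat 18 = 18 from rfl,
    show Int.toNat 21 = 21 from rfl, show Int.toNat 24 = 24 from rfl,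
    show Int.toNat 27 = 27 from rfl]
  norm_num
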